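-- pv_equiv track=rewrite | github.com/fangfang22-oss/ChineseNER | text_classification/xgboost_CHI_text_classification.py | calculate_B_from_A
-- ===== SOURCE A (Python) =====
-- def calculate_B_from_A(A):
--     '''
--     :param A: CHI公式中的A值
--     :return: B，CHI公职中的B值。不是某一类但是也包含单词t的文档。
--     '''
--     B = {}
--     for key in A:
--         B[key] = {}
--         for word in A[key]:
--             B[key][word] = 0
--             for kk in A:
--                 if kk != key and word in A[kk]:
--                     B[key][word] += A[kk][word]
--     return B
-- ===== SOURCE B (Python) =====
-- def calculate_B_from_A(A):
--     total = {}
--     for words in A.values():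
--         for w, c in words.items():
--             total[w] = total.get(w, 0) + c
--     return {key: {w: total[w] - c for w, c in words.items()}
--             for key, words in A.items()}
-- ===== Notes on version B (the rewrite author's own statement) =====
-- stated objective: faster
-- what changed: B precomputes a single dict of per-word totals over all classes in one pass and returns B[key][word] = total[word] - A[key][word], removing A's inner scan over all classes for every word.
import Mathlib
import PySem

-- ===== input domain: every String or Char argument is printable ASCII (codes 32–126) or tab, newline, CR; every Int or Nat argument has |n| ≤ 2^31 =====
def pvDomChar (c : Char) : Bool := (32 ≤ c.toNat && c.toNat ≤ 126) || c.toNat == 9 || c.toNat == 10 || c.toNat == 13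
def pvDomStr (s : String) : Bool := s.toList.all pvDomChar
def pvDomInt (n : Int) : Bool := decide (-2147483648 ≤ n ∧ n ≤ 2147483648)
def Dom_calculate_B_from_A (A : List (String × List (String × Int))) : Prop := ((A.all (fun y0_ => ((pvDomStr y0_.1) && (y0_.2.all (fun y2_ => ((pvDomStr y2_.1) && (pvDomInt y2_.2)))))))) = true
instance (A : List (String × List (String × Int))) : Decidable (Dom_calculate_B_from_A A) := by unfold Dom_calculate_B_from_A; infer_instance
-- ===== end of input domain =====

-- B replaces A's inner scan over all classes per word by one precomputed dict of per-word
-- totals and a subtraction (objective: faster).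

-- ===== PORT A =====
def calculate_B_from_A (A : List (String × List (String × Int))) : List (String × List (String × Int)) :=
  A.foldl (fun B p =>
    B ++ [(p.1, p.2.foldl (fun bk q =>
      bk ++ [(q.1, A.foldl (fun s r =>
        if r.1 ≠ p.1 then
          match r.2.lookup q.1 with
          | some v => s + v
          | none => s
        else s) 0)]) [])]) []

-- ===== PORT B =====
def calculate_B_from_A_alt (A : List (String × List (String × Int))) : List (String × List (String × Int)) :=
  let total : PySem.Dict String Int :=
    A.foldl (fun t p => p.2.foldl (fun t q => t.modify q.1 0 (· + q.2)) t) PySem.Dict.empty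
  A.map (fun p => (p.1, p.2.map (fun q => (q.1, total.getD q.1 0 - q.2))))

-- ===== PRECONDITION & SPEC =====
-- The Python argument is a dict of dicts, which cannot contain duplicate keys: Pre_ requires
-- distinct class names and distinct words within each class; assoc lists with duplicates do
-- not denote any Python input of this function.
def Pre_calculate_B_from_A (A : List (String × List (String × Int))) : Prop :=
  (A.map Prod.fst).Nodup ∧ ∀ p ∈ A, (p.2.map Prod.fst).Nodup
instance (A : List (String × List (String × Int))) : Decidable (Pre_calculate_B_from_A A) := by unfold Pre_calculate_B_from_A; infer_instance

def pvWitness_calculate_B_from_A : (List (String × List (String × Int))) :=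
  [("a", [("x", 1)]), ("b", [("x", 2), ("y", 3)])]

def Spec_calculate_B_from_A (A : List (String × List (String × Int))) (out : List (String × List (String × Int))) : Prop := out = calculate_B_from_A_alt A
instance (A : List (String × List (String × Int))) (out : List (String × List (String × Int))) : Decidable (Spec_calculate_B_from_A A out) := by unfold Spec_calculate_B_from_A; infer_instance

-- ===== CLAIM (what is proved, stated in full; the proofs are below) =====
def Claim_equal_calculate_B_from_A : Prop := ∀ (A : List (String × List (String × Int))), Dom_calculate_B_from_A A → Pre_calculate_B_from_A A → Spec_calculate_B_from_A A (calculate_B_from_A A)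

-- ===== LEMMAS AND PROOFS =====

-- the total weight that a class's word list contributes to word w
def pvWsum (ws : List (String × Int)) (w : String) : Int :=
  (ws.map (fun q => if q.1 = w then q.2 else 0)).sum

theorem pvWsum_cons (q : String × Int) (ws : List (String × Int)) (w : String) :
    pvWsum (q :: ws) w = (if q.1 = w then q.2 else 0) + pvWsum ws w := by
  simp [pvWsum]

theorem pvWsum_eq_zero (ws : List (String × Int)) (w : String)
    (h : w ∉ ws.map Prod.fst) : pvWsum ws w = 0 := by
  induction ws with
  | nil => rfl
  | cons q t ih =>
    simp only [List.map_cons, List.mem_cons, not_or] at h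
    rw [pvWsum_cons, if_neg (by exact fun he => h.1 he.symm), ih h.2, add_zero]

theorem lookup_getD_eq_pvWsum (ws : List (String × Int)) (w : String)
    (h : (ws.map Prod.fst).Nodup) : ((ws.lookup w).getD 0) = pvWsum ws w := by
  induction ws with
  | nil => rfl
  | cons q t ih =>
    simp only [List.map_cons, List.nodup_cons] at h
    rw [pvWsum_cons]
    by_cases hq : q.1 = w
    · subst hq
      simp [List.lookup, pvWsum_eq_zero t q.1 h.1]
    · have hb : (w == q.1) = false := beq_eq_false_iff_ne.mpr (fun he => hq he.symm)
      simp [List.lookup, hb, if_neg hq, ih h.2]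

theorem pvWsum_of_mem (ws : List (String × Int)) (w : String) (c : Int)
    (hm : (w, c) ∈ ws) (h : (ws.map Prod.fst).Nodup) : pvWsum ws w = c := by
  induction ws with
  | nil => cases hm
  | cons q t ih =>
    simp only [List.map_cons, List.nodup_cons] at h
    rcases List.mem_cons.mp hm with he | hm'
    · subst he
      rw [pvWsum_cons, if_pos rfl, pvWsum_eq_zero t w h.1, add_zero]
    · have hq : q.1 ≠ w := by
        intro he; exact h.1 (he ▸ List.mem_map.mpr ⟨(w, c), hm', rfl⟩)
      rw [pvWsum_cons, if_neg hq, ih hm' h.2, zero_add]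

-- A's innermost loop computes an if-sum over all classes
theorem innerA_eq (key w : String) (L : List (String × List (String × Int))) (s : Int) :
    L.foldl (fun s r =>
        if r.1 ≠ key then
          match r.2.lookup w with
          | some v => s + v
          | none => s
        else s) s
      = s + (L.map (fun p => if p.1 = key then 0 else (p.2.lookup w).getD 0)).sum := by
  induction L generalizing s with
  | nil => simp
  | cons r t ih =>
    simp only [List.foldl_cons, List.map_cons, List.sum_cons, ih]
    by_cases hr : r.1 = key
    · simp [hr]
    · cases hlk : r.2.lookup w with
      | none => simp [hr]
      | some v => simp [hr]; ring

-- one class folded into the running total dict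
theorem total_step (ws : List (String × Int)) (t : PySem.Dict String Int) (w : String) :
    (ws.foldl (fun t q => t.modify q.1 0 (· + q.2)) t).getD w 0
      = t.getD w 0 + pvWsum ws w := by
  induction ws generalizing t with
  | nil => simp [pvWsum]
  | cons q r ih =>
    rw [List.foldl_cons, ih, pvWsum_cons, PySem.Dict.getD_modify]
    by_cases hq : w = q.1
    · subst hq; simp; ring
    · rw [if_neg hq, if_neg (fun he => hq he.symm), zero_add]

-- the whole totals dict
theorem total_getD (L : List (String × List (String × Int))) (t : PySem.Dict String Int) (w : String) :
    (L.foldl (fun t p => p.2.foldl (fun t q => t.modify q.1 0 (· + q.2)) t) t).getD w 0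
      = t.getD w 0 + (L.map (fun p => pvWsum p.2 w)).sum := by
  induction L generalizing t with
  | nil => simp
  | cons p r ih =>
    rw [List.foldl_cons, ih, total_step]; simp; ring

-- splitting the total at the unique entry for `key`
theorem sum_split (L : List (String × List (String × Int))) (key w : String)
    (ws : List (String × Int)) (hm : (key, ws) ∈ L) (h : (L.map Prod.fst).Nodup) :
    (L.map (fun p => pvWsum p.2 w)).sum
      = (L.map (fun p => if p.1 = key then 0 else pvWsum p.2 w)).sum + pvWsum ws w := by
  induction L with
  | nil => cases hm
  | cons p t ih =>
    simp only [List.map_cons, List.nodup_cons] at h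
    rcases List.mem_cons.mp hm with he | hm'
    · have hp1 : p.1 = key := by rw [← he]
      have hp2 : p.2 = ws := by rw [← he]
      have ht : ∀ r ∈ t, (if r.1 = key then 0 else pvWsum r.2 w) = pvWsum r.2 w := by
        intro r hr
        rw [if_neg]
        intro hre
        apply h.1
        rw [hp1, ← hre]
        exact List.mem_map.mpr ⟨r, hr, rfl⟩
      simp only [List.map_cons, List.sum_cons, if_pos hp1, hp2, zero_add,
        List.map_congr_left ht]
      ring
    · have hp1 : p.1 ≠ key := by
        intro he'
        exact h.1 (he' ▸ List.mem_map.mpr ⟨(key, ws), hm', rfl⟩)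
      simp only [List.map_cons, List.sum_cons, if_neg hp1, ih hm' h.2]
      ring

-- ===== VERDICT (by name: the statement is the Claim_ definition above) =====
theorem calculate_B_from_A_spec : Claim_equal_calculate_B_from_A := by
  intro A _hdom hpre
  obtain ⟨hkeys, hwords⟩ := hpre
  unfold Spec_calculate_B_from_A calculate_B_from_A calculate_B_from_A_alt
  rw [PySem.List.foldl_append_singleton_eq_map]
  apply List.map_congr_left
  intro p hp
  rw [PySem.List.foldl_append_singleton_eq_map]
  refine congrArg (Prod.mk p.1) ?_
  apply List.map_congr_left
  intro q hq
  refine congrArg (Prod.mk q.1) ?_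
  rw [innerA_eq, total_getD, zero_add, PySem.Dict.getD_empty, zero_add]
  have hsplit := sum_split A p.1 q.1 p.2 (by exact (Prod.mk.eta ▸ hp)) hkeys
  rw [hsplit, pvWsum_of_mem p.2 q.1 q.2 (Prod.mk.eta ▸ hq) (hwords p hp)]
  have hcong : ∀ r ∈ A, (if r.1 = p.1 then 0 else (r.2.lookup q.1).getD 0)
      = (if r.1 = p.1 then 0 else pvWsum r.2 q.1) := by
    intro r hr
    by_cases hre : r.1 = p.1
    · simp [hre]
    · rw [if_neg hre, if_neg hre, lookup_getD_eq_pvWsum r.2 q.1 (hwords r hr)]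
  rw [List.map_congr_left hcong]
  ring
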